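-- pv_equiv track=rewrite | github.com/TheScarletBadger/Foo.Bar-Challenge | FreeTheBunnyPrisonersFinal.py | solution
-- ===== SOURCE A (Python) =====
-- from itertools import combinations as combi
--
-- def solution(n,k):
--     #The cap on number of each key type (kcap) in circulation is given by n-(k-1)
--     kcap = n-(k-1)
--
--     #lets make a matrix giving all posible ways of sampling kcap from a vector of length n.
--     subsets = list(combi(list(range(0,n)),kcap))
--
--     #initialize an empty matrix to hold the key distribution
--     scheme = [[] for x in range(0,n)]
--
--     #in 'subsets' row indices are key type names and elements are rabbit names
--     #so we just need to do the old switcharoo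
--     for r in range(0,len(subsets)):
--         subsrow = subsets[r]
--         for c in range(0,len(subsrow)):
--             rabbit = subsets[r][c]
--             keytype = r
--             scheme[rabbit].append(keytype)
--
--     return scheme
-- ===== SOURCE B (Python) =====
-- from itertools import combinations as combi
--
-- def solution(n, k):
--     kcap = n - (k - 1)
--     combs = [set(c) for c in combi(range(0, n), kcap)]
--     # gather per rabbit: rabbit r gets every key type whose subset contains r
--     return [[i for i, c in enumerate(combs) if r in c] for r in range(0, n)]
-- ===== Notes on version B (the rewrite author's own statement) =====
-- stated objective: simpler
-- what changed: Transposes the construction: instead of initializing an empty scheme and scattering each combination's index into its members' rows, B gathers per rabbit with one comprehension filtering the enumerated combinations by membership.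
import Mathlib
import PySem

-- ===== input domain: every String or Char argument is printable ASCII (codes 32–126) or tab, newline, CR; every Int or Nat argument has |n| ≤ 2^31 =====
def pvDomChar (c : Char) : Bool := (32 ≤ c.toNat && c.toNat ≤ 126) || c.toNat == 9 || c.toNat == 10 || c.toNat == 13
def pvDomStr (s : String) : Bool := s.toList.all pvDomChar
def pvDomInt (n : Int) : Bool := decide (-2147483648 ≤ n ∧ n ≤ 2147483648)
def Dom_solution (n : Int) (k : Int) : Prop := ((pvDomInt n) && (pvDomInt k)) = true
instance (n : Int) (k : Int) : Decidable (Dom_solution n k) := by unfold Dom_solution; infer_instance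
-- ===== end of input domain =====

-- B changes the decomposition only: a per-rabbit gather comprehension instead of A's scatter
-- into a mutable scheme; same values, same cost class ("simpler", not faster).

-- ===== PORT A =====
-- shared port of itertools.combinations (lexicographic order), used by both ports
def combiList (l : List Int) (r : Nat) : List (List Int) :=
  if l.length < r then []   -- itertools yields nothing when r exceeds len
  else
    match l, r with
    | _, 0 => [[]]
    | [], _ + 1 => []
    | x :: rest, r + 1 =>
        (combiList rest r).map (fun c => x :: c) ++ combiList rest (r + 1)

-- inner 'for c in range(len(subsrow)): scheme[rabbit].append(keytype)'
def innerLoop (keytype : Int) (subsrow : List Int) (scheme : List (List Int)) : List (List Int) :=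
  subsrow.foldl (fun sch rabbit => sch.set rabbit.toNat ((sch.getD rabbit.toNat []) ++ [keytype])) scheme

-- outer 'for r in range(len(subsets))', over the enumerated subsets
def outerLoop (ps : List (List Int × Nat)) (scheme : List (List Int)) : List (List Int) :=
  ps.foldl (fun sch p => innerLoop (p.2 : Int) p.1 sch) scheme

def solution (n : Int) (k : Int) : List (List Int) :=
  let kcap := n - (k - 1)
  let subsets := combiList ((List.range n.toNat).map Int.ofNat) kcap.toNat
  let scheme := List.replicate n.toNat ([] : List Int)
  outerLoop subsets.zipIdx scheme

-- ===== PORT B =====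
def solution_alt (n : Int) (k : Int) : List (List Int) :=
  let kcap := n - (k - 1)
  let combs := (combiList ((List.range n.toNat).map Int.ofNat) kcap.toNat).map PySem.Set.ofList
  ((List.range n.toNat).map Int.ofNat).map (fun r =>
    combs.zipIdx.filterMap (fun p => if r ∈ p.1 then some (p.2 : Int) else none))

-- ===== PRECONDITION & SPEC =====
-- Pre_ excludes exactly the inputs where kcap = n-(k-1) < 0, on which A (and B) raise ValueError
-- from itertools.combinations.
def Pre_solution (n : Int) (k : Int) : Prop := 0 ≤ n - (k - 1)
instance (n : Int) (k : Int) : Decidable (Pre_solution n k) := by unfold Pre_solution; infer_instance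
def pvWitness_solution : Int × Int := (4, 2)

def Spec_solution (n : Int) (k : Int) (out : List (List Int)) : Prop := out = solution_alt n k
instance (n : Int) (k : Int) (out : List (List Int)) : Decidable (Spec_solution n k out) := by unfold Spec_solution; infer_instance

-- ===== CLAIM (what is proved, stated in full; the proofs are below) =====
def Claim_equal_solution : Prop := ∀ (n : Int) (k : Int), Dom_solution n k → Pre_solution n k → Spec_solution n k (solution n k)

-- ===== LEMMAS AND PROOFS =====

theorem combi_subset (l : List Int) (r : Nat) (s : List Int) (hs : s ∈ combiList l r) :
    ∀ x ∈ s, x ∈ l := by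
  induction l generalizing r s with
  | nil =>
      cases r with
      | zero => simp [combiList] at hs; simp [hs]
      | succ r => simp [combiList] at hs
  | cons a rest ih =>
      cases r with
      | zero => simp [combiList] at hs; simp [hs]
      | succ r =>
          rw [combiList] at hs
          by_cases hlen : (a :: rest).length < r + 1
          · rw [if_pos hlen] at hs; simp at hs
          · simp only [if_neg hlen, List.mem_append, List.mem_map] at hs
            rcases hs with ⟨c, hc, rfl⟩ | hs
            · intro x hx
              rcases List.mem_cons.mp hx with rfl | hx
              · simp
              · exact List.mem_cons_of_mem _ (ih r c hc x hx)
            · intro x hx; exact List.mem_cons_of_mem _ (ih (r+1) s hs x hx)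

theorem combi_nodup (l : List Int) :
    ∀ (r : Nat) (s : List Int), l.Nodup → s ∈ combiList l r → s.Nodup := by
  induction l with
  | nil =>
      intro r s _ hs
      cases r with
      | zero => simp [combiList] at hs; simp [hs]
      | succ r => simp [combiList] at hs
  | cons a rest ih =>
      intro r s hl hs
      have hrest : rest.Nodup := hl.of_cons
      have ha : a ∉ rest := by simp [List.nodup_cons] at hl; exact hl.1
      cases r with
      | zero => simp [combiList] at hs; simp [hs]
      | succ r =>
          rw [combiList] at hs
          by_cases hlen : (a :: rest).length < r + 1
          · rw [if_pos hlen] at hs; simp at hs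
          · simp only [if_neg hlen, List.mem_append, List.mem_map] at hs
            rcases hs with ⟨c, hc, rfl⟩ | hs
            · have hc' : c.Nodup := ih r c hrest hc
              have : a ∉ c := fun hac => ha (combi_subset rest r c hc a hac)
              exact List.nodup_cons.mpr ⟨this, hc'⟩
            · exact ih (r+1) s hrest hs

theorem innerLoop_length (keytype : Int) (s : List Int) :
    ∀ sch : List (List Int), (innerLoop keytype s sch).length = sch.length := by
  induction s with
  | nil => intro sch; simp [innerLoop]
  | cons a rest ih =>
      intro sch
      simp only [innerLoop, List.foldl_cons] at *
      rw [ih]; simp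

theorem innerLoop_getD (keytype : Int) (s : List Int) :
    ∀ (sch : List (List Int)) (r : Nat),
      (∀ x ∈ s, 0 ≤ x ∧ x.toNat < sch.length) → r < sch.length →
      (innerLoop keytype s sch).getD r [] =
        sch.getD r [] ++ List.replicate (s.count ((r : Nat) : Int)) keytype := by
  induction s with
  | nil => intro sch r _ _; simp [innerLoop]
  | cons rabbit rest ih =>
      intro sch r hb hr
      have hrab := hb rabbit (by simp)
      simp only [innerLoop, List.foldl_cons]
      have hlen : (sch.set rabbit.toNat ((sch.getD rabbit.toNat []) ++ [keytype])).length
          = sch.length := by simp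
      have hb' : ∀ x ∈ rest, 0 ≤ x ∧ x.toNat <
          (sch.set rabbit.toNat ((sch.getD rabbit.toNat []) ++ [keytype])).length := by
        intro x hx; rw [hlen]; exact hb x (List.mem_cons_of_mem _ hx)
      have := ih (sch.set rabbit.toNat ((sch.getD rabbit.toNat []) ++ [keytype])) r hb' (by omega)
      rw [innerLoop] at this
      rw [this]
      by_cases hcase : rabbit = ((r : Nat) : Int)
      · have htn : rabbit.toNat = r := by omega
        have : (sch.set rabbit.toNat ((sch.getD rabbit.toNat []) ++ [keytype])).getD r []
            = sch.getD r [] ++ [keytype] := by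
          subst htn
          simp [List.getD, hrab.2]
        rw [this]
        simp [hcase]
        rw [← List.replicate_succ, List.replicate_succ']
      · have htn : rabbit.toNat ≠ r := by omega
        have : (sch.set rabbit.toNat ((sch.getD rabbit.toNat []) ++ [keytype])).getD r []
            = sch.getD r [] := by
          simp [List.getD, htn]
        rw [this]
        simp [hcase]

theorem outerLoop_length (ps : List (List Int × Nat)) :
    ∀ sch : List (List Int), (outerLoop ps sch).length = sch.length := by
  induction ps with
  | nil => intro sch; simp [outerLoop]
  | cons p rest ih =>
      intro sch
      simp only [outerLoop, List.foldl_cons] at *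
      rw [ih, innerLoop_length]

theorem outerLoop_getD (ps : List (List Int × Nat)) :
    ∀ (sch : List (List Int)) (r : Nat),
      (∀ p ∈ ps, (∀ x ∈ p.1, 0 ≤ x ∧ x.toNat < sch.length) ∧ p.1.Nodup) →
      r < sch.length →
      (outerLoop ps sch).getD r [] =
        sch.getD r [] ++
          ps.filterMap (fun p => if ((r : Nat) : Int) ∈ p.1 then some ((p.2 : Nat) : Int) else none) := by
  induction ps with
  | nil => intro sch r _ _; simp [outerLoop]
  | cons p rest ih =>
      intro sch r hh hr
      obtain ⟨hb, hnd⟩ := hh p (by simp)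
      simp only [outerLoop, List.foldl_cons]
      have hlen := innerLoop_length (p.2 : Int) p.1 sch
      have hh' : ∀ q ∈ rest, (∀ x ∈ q.1, 0 ≤ x ∧ x.toNat < (innerLoop (p.2 : Int) p.1 sch).length) ∧ q.1.Nodup := by
        intro q hq
        obtain ⟨hbq, hndq⟩ := hh q (List.mem_cons_of_mem _ hq)
        exact ⟨fun x hx => by rw [hlen]; exact hbq x hx, hndq⟩
      have := ih (innerLoop (p.2 : Int) p.1 sch) r hh' (by omega)
      rw [outerLoop] at this
      rw [this, innerLoop_getD (p.2 : Int) p.1 sch r hb hr]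
      by_cases hmem : ((r : Nat) : Int) ∈ p.1
      · have hcount : p.1.count ((r : Nat) : Int) = 1 := List.count_eq_one_of_mem hnd hmem
        simp [hmem, hcount]
      · have hcount : p.1.count ((r : Nat) : Int) = 0 := List.count_eq_zero_of_not_mem hmem
        simp [hmem, hcount]

theorem zipIdx_fst_mem {α : Type} {l : List α} {p : α × Nat} (h : p ∈ l.zipIdx) : p.1 ∈ l := by
  have := List.mem_zipIdx h
  exact this.2.2 ▸ List.getElem_mem _

theorem filterMap_zipIdx_ofList (r : Int) (cl : List (List Int)) :
    ∀ i : Nat,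
      ((cl.map PySem.Set.ofList).zipIdx i).filterMap
          (fun p => if r ∈ p.1 then some ((p.2 : Nat) : Int) else none)
        = (cl.zipIdx i).filterMap (fun p => if r ∈ p.1 then some ((p.2 : Nat) : Int) else none) := by
  induction cl with
  | nil => intro i; simp
  | cons c rest ih =>
      intro i
      simp only [List.map_cons, List.zipIdx_cons, List.filterMap_cons]
      rw [ih]
      have hmem : (r ∈ PySem.Set.ofList c) ↔ (r ∈ c) := PySem.Set.mem_ofList c r
      by_cases h : r ∈ c
      · simp [hmem.mpr h, h]
      · simp [fun hh => h (hmem.mp hh), h]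

theorem gather_eq_scatter (m kc : Nat) :
    outerLoop (combiList ((List.range m).map Int.ofNat) kc).zipIdx (List.replicate m ([] : List Int))
      = ((List.range m).map Int.ofNat).map (fun r =>
          ((combiList ((List.range m).map Int.ofNat) kc).map PySem.Set.ofList).zipIdx.filterMap
            (fun p => if r ∈ p.1 then some (p.2 : Int) else none)) := by
  have hnodup : ((List.range m).map Int.ofNat).Nodup :=
    (List.nodup_range).map (fun a b h => Int.ofNat.inj h)
  have hprops : ∀ p ∈ (combiList ((List.range m).map Int.ofNat) kc).zipIdx,
      (∀ x ∈ p.1, 0 ≤ x ∧ x.toNat < (List.replicate m ([] : List Int)).length) ∧ p.1.Nodup := by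
    intro p hp
    have hp1 : p.1 ∈ combiList ((List.range m).map Int.ofNat) kc := zipIdx_fst_mem hp
    constructor
    · intro x hx
      have := combi_subset _ _ _ hp1 x hx
      simp only [List.mem_map, List.mem_range] at this
      obtain ⟨j, hj, rfl⟩ := this
      simp [hj]
    · exact combi_nodup _ _ _ hnodup hp1
  have hlen : (outerLoop (combiList ((List.range m).map Int.ofNat) kc).zipIdx
      (List.replicate m ([] : List Int))).length = m := by
    rw [outerLoop_length]; simp
  apply List.ext_getElem
  · simp [hlen]
  · intro r h1 h2
    have hrm : r < m := by simpa using h2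
    simp only [List.getElem_map]
    rw [← List.getD_eq_getElem _ ([] : List Int) h1]
    rw [filterMap_zipIdx_ofList]
    rw [outerLoop_getD _ _ r hprops (by simp [hrm])]
    simp [List.getD, hrm]

-- ===== VERDICT (by name: the statement is the Claim_ definition above) =====
theorem solution_spec : Claim_equal_solution := by
  intro n k _ _
  show solution n k = solution_alt n k
  unfold solution solution_alt
  exact gather_eq_scatter n.toNat (n - (k - 1)).toNat
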